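-- pv_equiv track=rewrite | github.com/edurange/edurange3 | scenarios/global_scripts/analyze.py | get_ttylog_lines_to_decode
-- ===== SOURCE A (Python) =====
-- def get_ttylog_lines_to_decode(ttylog_lines_read_next, ttylog_lines_from_file, known_prompts, current_root_prompt):
--     # Return two lists
--     # The first list contains the ttylog lines that should be read in next iteration of infinite loop.
--     # The second list contain the ttylog lines that should be docded in current iteration of infinite loop.
--
--     if len(ttylog_lines_from_file) == 0:
--         return [], ttylog_lines_read_next
--
--     elif len(ttylog_lines_from_file) >= 1:
--         if len(ttylog_lines_read_next) > 0:
--             ttylog_lines_read_next[-1] += ttylog_lines_from_file[0]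
--             if len(ttylog_lines_from_file) > 1:
--                 ttylog_lines_read_next.extend(ttylog_lines_from_file[1:])
--         else:
--             ttylog_lines_read_next.extend(ttylog_lines_from_file)
--
--     index_ttylog_lines_file = None
--     line_prompt_end_index = -1
--     line_to_append = ''
--     current_root_prompt = current_root_prompt.casefold()
--
--     # When we get two user prompts in ttylog_lines_read_next, we add all the lines from first user prompt to second user prompt to ttylog_lines_to_decode.
--     # Second user prompt line is not inclusive
--     no_of_prompts_in_ttylog_read_next = 0
--
--     # Make a Reverse copy of the ttylog_lines_from_file list
--     ttylog_next_reverse = ttylog_lines_read_next[::-1]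
--     for count, line in enumerate(ttylog_next_reverse):
--         if r'END tty_sid' in line:
--             ttylog_lines_to_decode = ttylog_lines_read_next[::]
--             ttylog_lines_read_next = []
--             return ttylog_lines_to_decode, ttylog_lines_read_next
--         elif any(p.casefold() in line.casefold() for p in known_prompts):
--             no_of_prompts_in_ttylog_read_next += 1
--             # Break the loop of no_of_prompts >= 2
--             if no_of_prompts_in_ttylog_read_next >= 2:
--                 break
--
--             # Get index of this line in ttylog_lines_file
--             index_ttylog_lines_file = len(ttylog_lines_read_next) - 1 - count
--
--             # Find the last user prompt. Get data starting from 0th index to ending of last user prompt from the line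
--             for p in known_prompts:
--                 if (line.casefold().rfind(p.casefold()) > -1):
--                     line_prompt_end_index = line.casefold().rfind(p.casefold())
--                     line_prompt_end_index = line_prompt_end_index + len(p.casefold())
--                     break
--             line_to_append = line[:line_prompt_end_index]
--
--     if index_ttylog_lines_file is not None and no_of_prompts_in_ttylog_read_next >= 2:
--
--         ttylog_lines_to_decode = ttylog_lines_read_next[:index_ttylog_lines_file]
--
--         # Add the line containing user/root prompt to ttylog_lines_to_decode so that the most recently executed command can be parsed.
--         # The characters from 0th index till ending of last user prompt is included is contained in line_to_append
--         if len(line_to_append) > 0: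
--             ttylog_lines_to_decode.append(line_to_append)
--
--         ttylog_lines_read_next = ttylog_lines_read_next[index_ttylog_lines_file:]
--         return ttylog_lines_to_decode, ttylog_lines_read_next
--
--     else:
--         return [], ttylog_lines_read_next
-- ===== SOURCE B (Python) =====
-- def _prompt_tail(folded, line):
--     # characters of `line` up to the end of the last occurrence of the first matching prompt
--     lf = line.casefold()
--     for p in folded:
--         pos = lf.rfind(p)
--         if pos > -1:
--             return line[:pos + len(p)]
--     return ''
--
--
-- def get_ttylog_lines_to_decode(ttylog_lines_read_next, ttylog_lines_from_file, known_prompts, current_root_prompt):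
--     if len(ttylog_lines_from_file) == 0:
--         return [], ttylog_lines_read_next
--
--     # merge the freshly read lines into ttylog_lines_read_next (in place, as callers expect)
--     if len(ttylog_lines_read_next) > 0:
--         ttylog_lines_read_next[-1] += ttylog_lines_from_file[0]
--         ttylog_lines_read_next.extend(ttylog_lines_from_file[1:])
--     else:
--         ttylog_lines_read_next.extend(ttylog_lines_from_file)
--     merged = ttylog_lines_read_next
--
--     # one forward pass: indices of session-end lines and of prompt lines
--     folded = [p.casefold() for p in known_prompts]
--     ends = [i for i, line in enumerate(merged) if 'END tty_sid' in line]
--     prompts = [i for i, line in enumerate(merged)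
--                if 'END tty_sid' not in line and any(p in line.casefold() for p in folded)]
--
--     last_end = ends[-1] if ends else -1
--     second_prompt = prompts[-2] if len(prompts) >= 2 else -1
--
--     # an END line closer to the end than the second-last prompt: decode everything
--     if last_end > second_prompt:
--         return merged[:], []
--     # at least two prompts: split at the last prompt line
--     if len(prompts) >= 2:
--         split = prompts[-1]
--         line = merged[split]
--         decode = merged[:split]
--         tail = _prompt_tail(folded, line)
--         if tail:
--             decode.append(tail)
--         return decode, merged[split:]
--     return [], merged
-- ===== Notes on version B (the rewrite author's own statement) =====
-- stated objective: alternative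
-- what changed: Replaces A's backward early-exit scan over a reversed copy (stateful count/index/line_to_append bookkeeping) by one forward comprehension pass collecting END-line and prompt-line indices, then derives the whole/split/empty answer arithmetically from the last END index and the last two prompt indices.
import Mathlib
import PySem

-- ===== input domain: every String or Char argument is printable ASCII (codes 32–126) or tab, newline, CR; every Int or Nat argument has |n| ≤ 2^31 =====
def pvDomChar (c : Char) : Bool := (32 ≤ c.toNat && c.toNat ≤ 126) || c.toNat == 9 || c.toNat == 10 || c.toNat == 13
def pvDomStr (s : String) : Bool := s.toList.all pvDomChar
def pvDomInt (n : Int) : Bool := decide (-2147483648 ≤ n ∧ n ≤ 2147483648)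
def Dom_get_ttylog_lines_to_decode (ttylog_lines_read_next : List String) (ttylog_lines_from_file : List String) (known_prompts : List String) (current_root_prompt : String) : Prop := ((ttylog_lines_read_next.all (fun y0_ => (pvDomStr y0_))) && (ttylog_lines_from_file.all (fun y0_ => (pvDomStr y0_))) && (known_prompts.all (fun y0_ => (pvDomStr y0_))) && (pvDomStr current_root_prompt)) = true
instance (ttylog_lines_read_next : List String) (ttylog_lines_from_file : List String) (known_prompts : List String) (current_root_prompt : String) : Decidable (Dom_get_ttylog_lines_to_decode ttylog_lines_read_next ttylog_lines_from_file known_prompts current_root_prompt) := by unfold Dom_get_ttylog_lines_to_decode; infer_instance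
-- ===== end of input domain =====

-- ===== PORT A =====
-- B is an alternative decomposition (same asymptotic cost, no speed claim): one forward
-- index-collecting pass plus arithmetic on the collected indices, instead of A's backward
-- early-exit scan over a reversed copy.  Both Pythons mutate ttylog_lines_read_next identically
-- (the merge phase); the equivalence proved here is about the RETURN value.
-- A-side helpers (transliteration of A's expressions)
def pvEndHit (line : String) : Bool := PySem.Str.isIn "END tty_sid" line

def pvPromptHitA (known_prompts : List String) (line : String) : Bool :=
  known_prompts.any (fun p => PySem.Str.isIn (PySem.Str.lower p) (PySem.Str.lower line))

-- A's inner "for p in known_prompts: if rfind > -1: ...; break" loop, returning line_prompt_end_index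
def pvPromptEndIndexA (known_prompts : List String) (line : String) (lpe : Int) : Int :=
  match known_prompts with
  | [] => lpe
  | p :: rest =>
    if PySem.Str.rfind (PySem.Str.lower line) (PySem.Str.lower p) > -1 then
      PySem.Str.rfind (PySem.Str.lower line) (PySem.Str.lower p) + (PySem.Str.len (PySem.Str.lower p) : Int)
    else pvPromptEndIndexA rest line lpe

-- A's main "for count, line in enumerate(ttylog_next_reverse)" loop; `none` = the early
-- `END tty_sid` return; otherwise the final (index_ttylog_lines_file, line_to_append, count) state
def pvLoopA (known_prompts : List String) (lenm : Int) :
    List String → Int → Option Int → Int → String → Int → Option (Option Int × String × Int)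
  | [], _, idx?, _, lta, n => some (idx?, lta, n)
  | line :: rest, count, idx?, lpe, lta, n =>
    if pvEndHit line then none
    else if pvPromptHitA known_prompts line then
      if n + 1 ≥ 2 then some (idx?, lta, n + 1)
      else
        let lpe' := pvPromptEndIndexA known_prompts line lpe
        pvLoopA known_prompts lenm rest (count + 1) (some (lenm - 1 - count)) lpe'
          (PySem.Str.slice line none (some lpe')) (n + 1)
    else pvLoopA known_prompts lenm rest (count + 1) idx? lpe lta n

def get_ttylog_lines_to_decode (ttylog_lines_read_next : List String) (ttylog_lines_from_file : List String) (known_prompts : List String) (current_root_prompt : String) : List String × List String :=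
  if ttylog_lines_from_file.length = 0 then ([], ttylog_lines_read_next)
  else
    -- the in-place merge: ttylog_lines_read_next[-1] += ttylog_lines_from_file[0]; extend
    let rn :=
      if ttylog_lines_read_next.length > 0 then
        (ttylog_lines_read_next.dropLast ++
            [ttylog_lines_read_next.getLastD "" ++ ttylog_lines_from_file.headD ""]) ++
          (if ttylog_lines_from_file.length > 1 then ttylog_lines_from_file.tail else [])
      else ttylog_lines_read_next ++ ttylog_lines_from_file
    let _ := PySem.Str.lower current_root_prompt  -- current_root_prompt = current_root_prompt.casefold() (unused)
    let ttylog_next_reverse := (PySem.List.slice? rn none none (-1)).getD []   -- rn[::-1]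
    match pvLoopA known_prompts (rn.length : Int) ttylog_next_reverse 0 none (-1) "" 0 with
    | none => (rn, [])                                   -- ttylog_lines_read_next[::], []
    | some (idx?, line_to_append, n) =>
      match idx? with
      | some idx =>
        if n ≥ 2 then
          let dec := PySem.List.slice rn none (some idx)
          let dec := if (PySem.Str.len line_to_append : Int) > 0 then dec ++ [line_to_append] else dec
          (dec, PySem.List.slice rn (some idx) none)
        else ([], rn)
      | none => ([], rn)

-- ===== PORT B =====
-- B-side helpers
def pvEndHitB (line : String) : Bool := PySem.Str.isIn "END tty_sid" line

-- _prompt_tail(folded, line)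
def pvPromptTailB (folded : List String) (line : String) : String :=
  match folded with
  | [] => ""
  | p :: rest =>
    if PySem.Str.rfind (PySem.Str.lower line) p > -1 then
      PySem.Str.slice line none
        (some (PySem.Str.rfind (PySem.Str.lower line) p + (PySem.Str.len p : Int)))
    else pvPromptTailB rest line

def get_ttylog_lines_to_decode_alt (ttylog_lines_read_next : List String) (ttylog_lines_from_file : List String) (known_prompts : List String) (current_root_prompt : String) : List String × List String :=
  if ttylog_lines_from_file.length = 0 then ([], ttylog_lines_read_next)
  else
    let merged :=
      if ttylog_lines_read_next.length > 0 then
        (ttylog_lines_read_next.dropLast ++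
            [ttylog_lines_read_next.getLastD "" ++ ttylog_lines_from_file.headD ""]) ++
          ttylog_lines_from_file.tail
      else ttylog_lines_read_next ++ ttylog_lines_from_file
    let folded := known_prompts.map PySem.Str.lower
    let ends := ((PySem.List.enumerate merged).filter (fun p => pvEndHitB p.2)).map Prod.fst
    let prompts := ((PySem.List.enumerate merged).filter (fun p =>
        !pvEndHitB p.2 && folded.any (fun q => PySem.Str.isIn q (PySem.Str.lower p.2)))).map Prod.fst
    let lastEnd := ends.getLastD (-1)
    let secondPrompt := if prompts.length ≥ 2 then prompts.dropLast.getLastD (-1) else (-1 : Int)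
    if lastEnd > secondPrompt then (merged, [])
    else if prompts.length ≥ 2 then
      let split := prompts.getLastD (-1)
      let line := (PySem.List.pyGet? merged split).getD ""
      let tail := pvPromptTailB folded line
      let dec := PySem.List.slice merged none (some split)
      let dec := if (PySem.Str.len tail : Int) > 0 then dec ++ [tail] else dec
      (dec, PySem.List.slice merged (some split) none)
    else ([], merged)

-- ===== PRECONDITION & SPEC =====
def Spec_get_ttylog_lines_to_decode (ttylog_lines_read_next : List String) (ttylog_lines_from_file : List String) (known_prompts : List String) (current_root_prompt : String) (out : List String × List String) : Prop := out = get_ttylog_lines_to_decode_alt ttylog_lines_read_next ttylog_lines_from_file known_prompts current_root_prompt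
instance (ttylog_lines_read_next : List String) (ttylog_lines_from_file : List String) (known_prompts : List String) (current_root_prompt : String) (out : List String × List String) : Decidable (Spec_get_ttylog_lines_to_decode ttylog_lines_read_next ttylog_lines_from_file known_prompts current_root_prompt out) := by unfold Spec_get_ttylog_lines_to_decode; infer_instance

-- ===== CLAIM (what is proved, stated in full; the proofs are below) =====
def Claim_equal_get_ttylog_lines_to_decode : Prop := ∀ (ttylog_lines_read_next : List String) (ttylog_lines_from_file : List String) (known_prompts : List String) (current_root_prompt : String), Dom_get_ttylog_lines_to_decode ttylog_lines_read_next ttylog_lines_from_file known_prompts current_root_prompt → Spec_get_ttylog_lines_to_decode ttylog_lines_read_next ttylog_lines_from_file known_prompts current_root_prompt (get_ttylog_lines_to_decode ttylog_lines_read_next ttylog_lines_from_file known_prompts current_root_prompt)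

-- ===== LEMMAS AND PROOFS =====

def pvSig (known_prompts : List String) (line : String) : Bool :=
  pvEndHit line || pvPromptHitA known_prompts line

theorem pvRfindGo_nonneg_iff (s sub : List Char) (n : Nat) :
    -1 < PySem.Chars.rfind.go s sub n ↔ ∃ i, i ≤ n ∧ sub <+: s.drop i := by
  induction n with
  | zero =>
    by_cases h : sub.isPrefixOf s
    · simp [PySem.Chars.rfind.go, h, List.isPrefixOf_iff_prefix.mp h]
    · have hlt : ¬ (-1 < PySem.Chars.rfind.go s sub 0) := by simp [PySem.Chars.rfind.go, h]
      constructor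
      · intro hc; exact absurd hc hlt
      · rintro ⟨i, hi, hp⟩
        interval_cases i
        simp only [List.drop_zero] at hp
        exact absurd (List.isPrefixOf_iff_prefix.mpr hp) h
  | succ j ih =>
    by_cases h : sub.isPrefixOf (s.drop (j + 1))
    · constructor
      · intro _; exact ⟨j + 1, le_refl _, List.isPrefixOf_iff_prefix.mp h⟩
      · intro _
        simp [PySem.Chars.rfind.go, h]
    · have hgo : PySem.Chars.rfind.go s sub (j + 1) = PySem.Chars.rfind.go s sub j := by
        simp [PySem.Chars.rfind.go, h]
      rw [hgo, ih]
      constructor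
      · rintro ⟨i, hi, hp⟩; exact ⟨i, by omega, hp⟩
      · rintro ⟨i, hi, hp⟩
        refine ⟨i, ?_, hp⟩
        rcases Nat.lt_or_ge i (j + 1) with hlt | hge
        · omega
        · exfalso
          have : i = j + 1 := by omega
          subst this
          exact absurd (List.isPrefixOf_iff_prefix.mpr hp) (by simpa using h)

theorem pvRfind_pos_iff (s sub : List Char) :
    -1 < PySem.Chars.rfind s sub ↔ PySem.Chars.isIn sub s = true := by
  rw [show PySem.Chars.rfind s sub = PySem.Chars.rfind.go s sub s.length from rfl]
  rw [pvRfindGo_nonneg_iff, ← PySem.Chars.exists_prefix_drop_iff_isIn]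
  constructor
  · rintro ⟨i, _, h⟩; exact ⟨i, h⟩
  · rintro ⟨j, h⟩
    by_cases hj : j ≤ s.length
    · exact ⟨j, hj, h⟩
    · refine ⟨s.length, le_refl _, ?_⟩
      rw [List.drop_eq_nil_of_le (le_refl _)]
      rwa [List.drop_eq_nil_of_le (by omega)] at h

theorem pvStrRfind_pos_iff (s sub : String) :
    (PySem.Str.rfind s sub > -1) ↔ PySem.Str.isIn sub s = true := by
  rw [PySem.Str.rfind_eq, PySem.Str.isIn_eq]
  exact pvRfind_pos_iff s.toList sub.toList

theorem pvTail_eq (known_prompts : List String) (line : String) (lpe : Int)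
    (h : pvPromptHitA known_prompts line = true) :
    PySem.Str.slice line none (some (pvPromptEndIndexA known_prompts line lpe)) =
      pvPromptTailB (known_prompts.map PySem.Str.lower) line := by
  induction known_prompts with
  | nil => simp [pvPromptHitA] at h
  | cons p rest ih =>
    by_cases hm : PySem.Str.rfind (PySem.Str.lower line) (PySem.Str.lower p) > -1
    · simp only [List.map_cons, pvPromptEndIndexA, pvPromptTailB]
      rw [if_pos hm, if_pos hm]
    · have hni : ¬ PySem.Str.isIn (PySem.Str.lower p) (PySem.Str.lower line) = true := by
        rw [← pvStrRfind_pos_iff]; exact hm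
      have hrest : pvPromptHitA rest line = true := by
        simp only [pvPromptHitA, List.any_cons, Bool.or_eq_true] at h
        rcases h with h1 | h2
        · exact absurd h1 hni
        · exact h2
      simp only [List.map_cons, pvPromptEndIndexA, pvPromptTailB]
      rw [if_neg hm, if_neg hm]
      exact ih hrest

theorem pvLoopA_phase1 (known_prompts : List String) (lenm : Int) (r : List String)
    (c i0 lpe : Int) (lta : String) :
    pvLoopA known_prompts lenm r c (some i0) lpe lta 1 =
      match r.dropWhile (fun line => !pvSig known_prompts line) with
      | [] => some (some i0, lta, 1)
      | line :: _ => if pvEndHit line then none else some (some i0, lta, 2) := by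
  induction r generalizing c with
  | nil => simp [pvLoopA]
  | cons line rest ih =>
    by_cases hE : pvEndHit line
    · simp [pvLoopA, hE, pvSig]
    · by_cases hP : pvPromptHitA known_prompts line
      · simp [pvLoopA, hE, hP, pvSig]
      · simp [pvLoopA, hE, hP, pvSig, ih]

theorem pvLoopA_phase0 (known_prompts : List String) (lenm : Int) (r : List String) (c : Int) :
    pvLoopA known_prompts lenm r c none (-1) "" 0 =
      match r.dropWhile (fun line => !pvSig known_prompts line) with
      | [] => some (none, "", 0)
      | line :: rest' =>
        if pvEndHit line then none
        else
          let lpe' := pvPromptEndIndexA known_prompts line (-1)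
          let lta := PySem.Str.slice line none (some lpe')
          let idx := lenm - 1 - (c + ((r.takeWhile (fun line => !pvSig known_prompts line)).length : Int))
          match rest'.dropWhile (fun line => !pvSig known_prompts line) with
          | [] => some (some idx, lta, 1)
          | line2 :: _ => if pvEndHit line2 then none else some (some idx, lta, 2) := by
  induction r generalizing c with
  | nil => simp [pvLoopA]
  | cons line rest ih =>
    by_cases hE : pvEndHit line
    · simp [pvLoopA, hE, pvSig]
    · by_cases hP : pvPromptHitA known_prompts line
      · have h2 : ¬ ((0:Int) + 1 ≥ 2) := by omega
        simp only [pvLoopA, hE, hP, h2, List.dropWhile_cons, List.takeWhile_cons, pvSig]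
        norm_num
        rw [pvLoopA_phase1]
        have hpred : (fun line => !pvEndHit line && !pvPromptHitA known_prompts line) =
            (fun line => !pvSig known_prompts line) := by
          funext l; simp [pvSig, Bool.not_or]
        simp [hE, hpred]
      · have hskip : (!pvSig known_prompts line) = true := by simp [pvSig, hE, hP]
        simp only [pvLoopA, hE, hP, List.dropWhile_cons, List.takeWhile_cons, hskip,
          if_true, List.length_cons]
        rw [ih (c + 1)]
        rcases hd : rest.dropWhile (fun line => !pvSig known_prompts line) with _ | ⟨l2, r2⟩
        · simp
        · have harith : lenm - 1 - (c + 1 + ((rest.takeWhile (fun line => !pvSig known_prompts line)).length : Int)) =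
              lenm - 1 - (c + (((rest.takeWhile (fun line => !pvSig known_prompts line)).length : Int) + 1)) := by ring
          simp only [harith]
          push_cast
          ring_nf

theorem pvFilter_dropWhile {alpha : Type} (f p : alpha → Bool) (l : List alpha)
    (himp : ∀ x, p x = true → f x = false) :
    l.filter f = (l.dropWhile p).filter f := by
  conv_lhs => rw [← List.takeWhile_append_dropWhile (p := p) (l := l)]
  rw [List.filter_append]
  have h0 : (l.takeWhile p).filter f = [] :=
    List.filter_eq_nil_iff.mpr (fun a ha => by simp [himp a (List.mem_takeWhile_imp ha)])
  simp [h0]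

theorem pvPairwise_suffix_head {l s : List (Int × String)} {q : Int × String}
    (hpw : List.Pairwise (fun a b : Int × String => b.1 < a.1) l) (hs : (q :: s) <:+ l) :
    ∀ x ∈ s, x.1 < q.1 := by
  exact (List.pairwise_cons.mp (List.Pairwise.sublist hs.sublist hpw)).1

-- B's last-element reads, rewritten to head reads of the reversed enumeration
theorem pvGetLastD_filter_map (E : List (Int × String)) (f : Int × String → Bool) :
    ((E.filter f).map Prod.fst).getLastD (-1) =
      ((E.reverse.filter f).map Prod.fst).headD (-1) := by
  rw [List.filter_reverse, List.getLastD_eq_getLast?, List.getLast?_eq_head?_reverse,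
    ← List.map_reverse]
  simp [List.headD_eq_head?_getD]

theorem pvSecondLastD_filter_map (E : List (Int × String)) (f : Int × String → Bool) :
    ((E.filter f).map Prod.fst).dropLast.getLastD (-1) =
      (((E.reverse.filter f).map Prod.fst).tail).headD (-1) := by
  rw [List.filter_reverse, List.getLastD_eq_getLast?, List.getLast?_eq_head?_reverse,
    ← List.tail_reverse, ← List.map_reverse]
  simp [List.headD_eq_head?_getD]

-- the head of the dropWhile suffix of the reversed enumeration carries index len - 1 - |takeWhile|
theorem pvHead_dropWhile_fst (m : List String) (P : Int × String → Bool)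
    (q : Int × String) (S' : List (Int × String))
    (h : (PySem.List.enumerate m 0).reverse.dropWhile P = q :: S') :
    q.1 = (m.length : Int) - 1 - (((PySem.List.enumerate m 0).reverse.takeWhile P).length : Int) := by
  have hsplit : (PySem.List.enumerate m 0).reverse.takeWhile P ++ (q :: S') =
      (PySem.List.enumerate m 0).reverse := by
    rw [← h, List.takeWhile_append_dropWhile]
  set T := (PySem.List.enumerate m 0).reverse.takeWhile P with hT
  have hlenE : (PySem.List.enumerate m 0).reverse.length = m.length := by
    simp [PySem.List.length_enumerate]
  have hjlt : T.length < m.length := by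
    have := congrArg List.length hsplit
    simp at this
    omega
  have hq : q = (PySem.List.enumerate m 0).reverse[T.length]'(by omega) := by
    have h2 : T.length < (T ++ q :: S').length := by simp
    have e1 : (T ++ q :: S')[T.length]'h2 = q := by
      rw [List.getElem_append_right (le_refl _)]
      simp
    rw [← e1]
    exact List.getElem_of_eq hsplit _
  have hq2 : q = (PySem.List.enumerate m 0)[(PySem.List.enumerate m 0).length - 1 - T.length]'(by
      simp [PySem.List.length_enumerate]; omega) := by
    rw [hq]; exact List.getElem_reverse _
  rw [PySem.List.getElem_enumerate] at hq2
  rw [hq2]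
  simp [PySem.List.length_enumerate]
  omega
theorem pvHeadD_lt {L : List (Int × String)} {b : Int} (h : ∀ x ∈ L, x.1 < b) (hb : -1 < b) :
    (L.map Prod.fst).headD (-1) < b := by
  cases L with
  | nil => simpa using hb
  | cons a t => simpa using h a (by simp)

-- main theorem
theorem get_ttylog_lines_to_decode_spec : Claim_equal_get_ttylog_lines_to_decode := by
  intro rn ff kp crp _hdom
  unfold Spec_get_ttylog_lines_to_decode
  by_cases hff : ff.length = 0
  · simp [get_ttylog_lines_to_decode, get_ttylog_lines_to_decode_alt, hff]
  · have htail : (if ff.length > 1 then ff.tail else []) = ff.tail := by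
      rcases ff with _ | ⟨a, t⟩
      · simp at hff
      · rcases t with _ | ⟨b, u⟩ <;> simp
    simp only [get_ttylog_lines_to_decode, get_ttylog_lines_to_decode_alt, hff, if_false, htail,
      PySem.List.slice?_none_none_neg_one, Option.getD_some,
      show pvEndHitB = pvEndHit from rfl]
    generalize (if rn.length > 0 then rn.dropLast ++ [rn.getLastD "" ++ ff.headD ""] ++ ff.tail
      else rn ++ ff) = m
    -- rewrite B's prompt predicate to A's
    have hG : (fun (p : Int × String) => !pvEndHit p.2 &&
          ((kp.map PySem.Str.lower).any fun q => PySem.Str.isIn q (PySem.Str.lower p.2))) =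
        (fun p : Int × String => !pvEndHit p.2 && pvPromptHitA kp p.2) := by
      funext p
      rw [List.any_map]
      rfl
    rw [hG]
    -- B's last-element reads become head reads over the reversed enumeration
    simp only [pvGetLastD_filter_map, pvSecondLastD_filter_map]
    have hlenfil : ∀ f : Int × String → Bool,
        ((List.filter f (PySem.List.enumerate m 0)).map Prod.fst).length =
          ((PySem.List.enumerate m 0).reverse.filter f).length := by
      intro f
      simp [List.filter_reverse]
    simp only [hlenfil]
    -- A's loop in closed form
    rw [pvLoopA_phase0]
    have hrev : m.reverse = (PySem.List.enumerate m 0).reverse.map Prod.snd := by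
      rw [List.map_reverse, PySem.List.map_snd_enumerate]
    have hdw : m.reverse.dropWhile (fun line => !pvSig kp line) =
        ((PySem.List.enumerate m 0).reverse.dropWhile
          (fun p : Int × String => !pvSig kp p.2)).map Prod.snd := by
      rw [hrev, List.dropWhile_map]
      rfl
    have htw : (m.reverse.takeWhile (fun line => !pvSig kp line)).length =
        ((PySem.List.enumerate m 0).reverse.takeWhile
          (fun p : Int × String => !pvSig kp p.2)).length := by
      rw [hrev, List.takeWhile_map, List.length_map]
      rfl
    rw [hdw, htw]
    -- classification facts
    have hpwE : List.Pairwise (fun a b : Int × String => b.1 < a.1)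
        (PySem.List.enumerate m 0).reverse :=
      List.pairwise_reverse.mpr (PySem.List.pairwise_lt_enumerate m 0)
    have himpF : ∀ x : Int × String, (!pvSig kp x.2) = true → (pvEndHit x.2) = false := by
      intro x hx
      simp [pvSig] at hx
      exact hx.1
    have himpG : ∀ x : Int × String,
        (!pvSig kp x.2) = true → (!pvEndHit x.2 && pvPromptHitA kp x.2) = false := by
      intro x hx
      simp [pvSig] at hx
      simp [hx.1, hx.2]
    rw [pvFilter_dropWhile (fun p : Int × String => pvEndHit p.2)
        (fun p : Int × String => !pvSig kp p.2) (PySem.List.enumerate m 0).reverse himpF]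
    rw [pvFilter_dropWhile (fun p : Int × String => !pvEndHit p.2 && pvPromptHitA kp p.2)
        (fun p : Int × String => !pvSig kp p.2) (PySem.List.enumerate m 0).reverse himpG]
    cases hS : (PySem.List.enumerate m 0).reverse.dropWhile
        (fun p : Int × String => !pvSig kp p.2) with
    | nil => simp
    | cons q S' =>
      have hsufS : (q :: S') <:+ (PySem.List.enumerate m 0).reverse := by
        rw [← hS]; exact List.dropWhile_suffix _
      have hordS' : ∀ x ∈ S', x.1 < q.1 := pvPairwise_suffix_head hpwE hsufS
      have hqmem : q ∈ PySem.List.enumerate m 0 :=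
        List.mem_reverse.mp (hsufS.subset (by simp))
      obtain ⟨k, hk, hqe⟩ := (PySem.List.mem_enumerate_iff m 0 q).mp hqmem
      have hq1k : q.1 = (k : Int) := by rw [hqe]; simp
      have hq2k : q.2 = m[k] := by rw [hqe]
      have hq1nn : (0 : Int) ≤ q.1 := by rw [hq1k]; positivity
      have hsig : pvSig kp q.2 = true := by
        have hne : (PySem.List.enumerate m 0).reverse.dropWhile
            (fun p : Int × String => !pvSig kp p.2) ≠ [] := by
          rw [hS]; simp
        have hhead := List.head_dropWhile_not (fun p : Int × String => !pvSig kp p.2) hne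
        have hh : ((PySem.List.enumerate m 0).reverse.dropWhile
            (fun p : Int × String => !pvSig kp p.2)).head hne = q := by
          simp [hS]
        rw [hh] at hhead
        simpa using hhead
      have hq1 := pvHead_dropWhile_fst m _ q S' hS
      simp only [List.map_cons]
      by_cases hEq : pvEndHit q.2
      · -- END line closest to the end: both sides return (m, [])
        have hFq : List.filter (fun p : Int × String => pvEndHit p.2) (q :: S') =
            q :: List.filter (fun p : Int × String => pvEndHit p.2) S' :=
          List.filter_cons_of_pos hEq
        have hGq : List.filter (fun p : Int × String => !pvEndHit p.2 && pvPromptHitA kp p.2) (q :: S') =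
            List.filter (fun p : Int × String => !pvEndHit p.2 && pvPromptHitA kp p.2) S' :=
          List.filter_cons_of_neg (by simp [hEq])
        rw [hFq, hGq]
        have hsp : (if (List.filter (fun p : Int × String => !pvEndHit p.2 && pvPromptHitA kp p.2) S').length ≥ 2 then
            (List.map Prod.fst (List.filter (fun p : Int × String => !pvEndHit p.2 && pvPromptHitA kp p.2) S')).tail.headD (-1)
          else (-1 : Int)) < q.1 := by
          split
          · rw [← List.map_tail]
            apply pvHeadD_lt
            · intro x hx
              exact hordS' x (List.mem_of_mem_filter (List.mem_of_mem_tail hx))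
            · omega
          · omega
        simp only [List.map_cons, List.headD_cons]
        rw [if_pos hsp]
        simp [hEq]
      · -- q is a prompt line
        have hPq : pvPromptHitA kp q.2 = true := by
          simp only [pvSig, Bool.or_eq_true] at hsig
          rcases hsig with h1 | h2
          · exact absurd h1 hEq
          · exact h2
        have hFq : List.filter (fun p : Int × String => pvEndHit p.2) (q :: S') =
            List.filter (fun p : Int × String => pvEndHit p.2) S' :=
          List.filter_cons_of_neg (by simp [hEq])
        have hGq : List.filter (fun p : Int × String => !pvEndHit p.2 && pvPromptHitA kp p.2) (q :: S') =
            q :: List.filter (fun p : Int × String => !pvEndHit p.2 && pvPromptHitA kp p.2) S' :=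
          List.filter_cons_of_pos (by simp [hEq, hPq])
        rw [hFq, hGq]
        have hdw2 : (List.map Prod.snd S').dropWhile (fun line => !pvSig kp line) =
            (S'.dropWhile (fun p : Int × String => !pvSig kp p.2)).map Prod.snd := by
          rw [List.dropWhile_map]
          rfl
        rw [hdw2]
        rw [pvFilter_dropWhile (fun p : Int × String => pvEndHit p.2)
            (fun p : Int × String => !pvSig kp p.2) S' himpF]
        rw [pvFilter_dropWhile (fun p : Int × String => !pvEndHit p.2 && pvPromptHitA kp p.2)
            (fun p : Int × String => !pvSig kp p.2) S' himpG]
        cases hS2 : S'.dropWhile (fun p : Int × String => !pvSig kp p.2) with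
        | nil =>
          simp [hEq]
        | cons q2 S2' =>
          have hsufS' : S' <:+ (PySem.List.enumerate m 0).reverse :=
            (List.suffix_cons q S').trans hsufS
          have hsuf2 : (q2 :: S2') <:+ (PySem.List.enumerate m 0).reverse := by
            rw [← hS2]; exact (List.dropWhile_suffix _).trans hsufS'
          have hord2 : ∀ x ∈ S2', x.1 < q2.1 := pvPairwise_suffix_head hpwE hsuf2
          have hq2mem : q2 ∈ PySem.List.enumerate m 0 :=
            List.mem_reverse.mp (hsuf2.subset (by simp))
          obtain ⟨k2, hk2, hq2e⟩ := (PySem.List.mem_enumerate_iff m 0 q2).mp hq2mem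
          have hq21nn : (0 : Int) ≤ q2.1 := by rw [hq2e]; positivity
          have hsig2 : pvSig kp q2.2 = true := by
            have hne : S'.dropWhile (fun p : Int × String => !pvSig kp p.2) ≠ [] := by
              rw [hS2]; simp
            have hhead := List.head_dropWhile_not (fun p : Int × String => !pvSig kp p.2) hne
            have hh : (S'.dropWhile (fun p : Int × String => !pvSig kp p.2)).head hne = q2 := by
              simp [hS2]
            rw [hh] at hhead
            simpa using hhead
          simp only [List.map_cons]
          by_cases hEq2 : pvEndHit q2.2
          · -- END between the two nearest prompts: both sides return (m, [])
            have hF2 : List.filter (fun p : Int × String => pvEndHit p.2) (q2 :: S2') =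
                q2 :: List.filter (fun p : Int × String => pvEndHit p.2) S2' :=
              List.filter_cons_of_pos hEq2
            have hG2 : List.filter (fun p : Int × String => !pvEndHit p.2 && pvPromptHitA kp p.2) (q2 :: S2') =
                List.filter (fun p : Int × String => !pvEndHit p.2 && pvPromptHitA kp p.2) S2' :=
              List.filter_cons_of_neg (by simp [hEq2])
            rw [hF2, hG2]
            simp only [List.map_cons, List.headD_cons, List.tail_cons]
            have hsp : (if (q :: List.filter (fun p : Int × String => !pvEndHit p.2 && pvPromptHitA kp p.2) S2').length ≥ 2 then
                (List.map Prod.fst (List.filter (fun p : Int × String => !pvEndHit p.2 && pvPromptHitA kp p.2) S2')).headD (-1)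
              else (-1 : Int)) < q2.1 := by
              split
              · apply pvHeadD_lt
                · intro x hx
                  exact hord2 x (List.mem_of_mem_filter hx)
                · omega
              · omega
            rw [if_pos hsp]
            simp [hEq, hEq2]
          · -- two prompts, no END in between: both sides split at q.1
            have hPq2 : pvPromptHitA kp q2.2 = true := by
              simp only [pvSig, Bool.or_eq_true] at hsig2
              rcases hsig2 with h1 | h2
              · exact absurd h1 hEq2
              · exact h2
            have hF2 : List.filter (fun p : Int × String => pvEndHit p.2) (q2 :: S2') =
                List.filter (fun p : Int × String => pvEndHit p.2) S2' :=
              List.filter_cons_of_neg (by simp [hEq2])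
            have hG2 : List.filter (fun p : Int × String => !pvEndHit p.2 && pvPromptHitA kp p.2) (q2 :: S2') =
                q2 :: List.filter (fun p : Int × String => !pvEndHit p.2 && pvPromptHitA kp p.2) S2' :=
              List.filter_cons_of_pos (by simp [hEq2, hPq2])
            rw [hF2, hG2]
            simp only [List.map_cons, List.headD_cons, List.tail_cons]
            have hle : (List.map Prod.fst (List.filter (fun p : Int × String => pvEndHit p.2) S2')).headD (-1) < q2.1 := by
              apply pvHeadD_lt
              · intro x hx
                exact hord2 x (List.mem_of_mem_filter hx)
              · omega
            have hc1 : ¬ ((List.map Prod.fst (List.filter (fun p : Int × String => pvEndHit p.2) S2')).headD (-1) >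
                (if (q :: q2 :: List.filter (fun p : Int × String => !pvEndHit p.2 && pvPromptHitA kp p.2) S2').length ≥ 2
                  then q2.1 else (-1 : Int))) := by
              split
              · omega
              · next hlen => exact absurd (by simp only [List.length_cons]; omega) hlen
            rw [if_neg hc1]
            rw [if_pos (show (q :: q2 :: List.filter (fun p : Int × String => !pvEndHit p.2 && pvPromptHitA kp p.2) S2').length ≥ 2 from by
              simp only [List.length_cons]; omega)]
            have hline : (PySem.List.pyGet? m q.1).getD "" = q.2 := by
              rw [hq1k, PySem.List.pyGet?_natCast, List.getElem?_eq_getElem hk]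
              rw [hq2k]
              rfl
            rw [hline]
            rw [← pvTail_eq kp q.2 (-1) hPq]
            have hidx : ((m.length : Int) - 1 - ((List.takeWhile (fun p : Int × String => !pvSig kp p.2)
                (PySem.List.enumerate m 0).reverse).length : Int)) = q.1 := by
              rw [hq1]
            simp [hEq, hEq2, hidx]
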